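-- pv_equiv track=rewrite | github.com/gloridas75/ngrsserver08 | context/constraints/C2_mom_weekly_hours_pattern_aware.py | get_consecutive_work_position
-- ===== SOURCE A (Python) =====
-- def get_consecutive_work_position(pattern, pattern_day):
--     """
--     Get position in consecutive work sequence for given pattern day.
--
--     Args:
--         pattern: Work pattern list (e.g., ['D','D','D','D','D','D','O'])
--         pattern_day: Current position in pattern (0-based)
--
--     Returns:
--         Position in consecutive work sequence (1-based).
--         Returns 1 for first work day or after off day.
--
--     Examples:
--         Pattern: ['D','D','D','D','D','D','O']
--         pattern_day=0 → position=1 (1st consecutive)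
--         pattern_day=2 → position=3 (3rd consecutive)
--         pattern_day=5 → position=6 (6th consecutive)
--
--         Pattern: ['D','D','O','D','D','D','O']
--         pattern_day=0 → position=1 (1st consecutive)
--         pattern_day=1 → position=2 (2nd consecutive)
--         pattern_day=3 → position=1 (1st after off day)
--         pattern_day=4 → position=2 (2nd consecutive)
--         pattern_day=5 → position=3 (3rd consecutive)
--     """
--     if not pattern or pattern_day < 0 or pattern_day >= len(pattern):
--         return 1
--
--     # Count backwards from current position to find consecutive work days
--     position = 1
--
--     # Look backwards from pattern_day-1 to count consecutive work days
--     for i in range(pattern_day - 1, -1, -1):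
--         if pattern[i] not in ['O', '0']:
--             position += 1
--         else:
--             # Hit an off day, stop counting
--             break
--
--     return position
-- ===== SOURCE B (Python) =====
-- def get_consecutive_work_position(pattern, pattern_day):
--     if not pattern or pattern_day < 0 or pattern_day >= len(pattern):
--         return 1
--     # Forward scan: remember the index of the last off marker before pattern_day.
--     last_off = -1
--     for i in range(pattern_day):
--         if pattern[i] in ('O', '0'):
--             last_off = i
--     return pattern_day - last_off
-- ===== Notes on version B (the rewrite author's own statement) =====
-- stated objective: alternative
-- what changed: Replaces A's backward scan with early break (counting consecutive work days) by a forward scan over pattern[0:pattern_day] recording the index of the last off marker, returning pattern_day - last_off.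
import Mathlib
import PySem

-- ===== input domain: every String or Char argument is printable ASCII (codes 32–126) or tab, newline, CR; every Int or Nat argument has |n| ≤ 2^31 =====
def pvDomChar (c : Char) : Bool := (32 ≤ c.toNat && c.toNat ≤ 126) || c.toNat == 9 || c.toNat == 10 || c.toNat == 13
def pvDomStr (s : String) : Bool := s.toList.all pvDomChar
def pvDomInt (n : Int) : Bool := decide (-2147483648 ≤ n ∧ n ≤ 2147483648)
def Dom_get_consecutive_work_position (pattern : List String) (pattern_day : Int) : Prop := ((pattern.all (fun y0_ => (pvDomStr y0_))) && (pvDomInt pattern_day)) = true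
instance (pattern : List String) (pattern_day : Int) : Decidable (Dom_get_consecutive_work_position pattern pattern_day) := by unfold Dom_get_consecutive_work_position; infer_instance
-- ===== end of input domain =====

-- B replaces A's backward scan-with-break by a forward scan recording the last
-- off-marker index and returning pattern_day - last_off (alternative decomposition).


-- ===== PORT A =====
-- backward loop 'for i in range(pattern_day-1, -1, -1)': the Nat argument n means
-- the next index inspected is n-1; break returns the accumulated position.
def goA (pattern : List String) : Nat → Int → Int
  | 0, pos => pos
  | n+1, pos =>
    if ¬ (PySem.List.pyGetD pattern (n : Int) "" = "O" ∨ PySem.List.pyGetD pattern (n : Int) "" = "0")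
    then goA pattern n (pos + 1)
    else pos

def get_consecutive_work_position (pattern : List String) (pattern_day : Int) : Int :=
  if pattern = [] ∨ pattern_day < 0 ∨ pattern_day ≥ pattern.length then 1
  else goA pattern pattern_day.toNat 1

-- ===== PORT B =====
def get_consecutive_work_position_alt (pattern : List String) (pattern_day : Int) : Int :=
  if pattern = [] ∨ pattern_day < 0 ∨ pattern_day ≥ pattern.length then 1
  else
    let last_off := (PySem.List.pyRange 0 pattern_day 1).foldl
      (fun acc i =>
        if PySem.List.pyGetD pattern i "" = "O" ∨ PySem.List.pyGetD pattern i "" = "0"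
        then i else acc) (-1)
    pattern_day - last_off

-- ===== PRECONDITION & SPEC =====
def Spec_get_consecutive_work_position (pattern : List String) (pattern_day : Int) (out : Int) : Prop := out = get_consecutive_work_position_alt pattern pattern_day
instance (pattern : List String) (pattern_day : Int) (out : Int) : Decidable (Spec_get_consecutive_work_position pattern pattern_day out) := by unfold Spec_get_consecutive_work_position; infer_instance

-- ===== CLAIM (what is proved, stated in full; the proofs are below) =====
def Claim_equal_get_consecutive_work_position : Prop := ∀ (pattern : List String) (pattern_day : Int), Dom_get_consecutive_work_position pattern pattern_day → Spec_get_consecutive_work_position pattern pattern_day (get_consecutive_work_position pattern pattern_day)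

-- ===== LEMMAS AND PROOFS =====
def lastOff (pattern : List String) (n : Nat) : Int :=
  (PySem.List.pyRange 0 (n : Int) 1).foldl
    (fun acc i =>
      if PySem.List.pyGetD pattern i "" = "O" ∨ PySem.List.pyGetD pattern i "" = "0"
      then i else acc) (-1)

theorem goA_acc (pattern : List String) (n : Nat) (p : Int) :
    goA pattern n (p + 1) = goA pattern n p + 1 := by
  induction n generalizing p with
  | zero => simp [goA]
  | succ n ih =>
    simp only [goA]
    split_ifs with h
    · rfl
    · exact ih (p + 1)

theorem pyRange_succ (n : Nat) :
    PySem.List.pyRange 0 ((n : Int) + 1) 1 = PySem.List.pyRange 0 (n : Int) 1 ++ [(n : Int)] := by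
  rw [PySem.List.pyRange_one, PySem.List.pyRange_one]
  have h1 : ((n : Int) + 1 - 0).toNat = n + 1 := by omega
  have h2 : ((n : Int) - 0).toNat = n := by omega
  rw [h1, h2, List.range_succ]
  simp

theorem main_lemma (pattern : List String) (n : Nat) :
    goA pattern n 1 = (n : Int) - lastOff pattern n := by
  induction n with
  | zero =>
    simp [goA, lastOff, PySem.List.pyRange_one]
  | succ n ih =>
    have hlo : lastOff pattern (n + 1) =
        if PySem.List.pyGetD pattern (n : Int) "" = "O" ∨ PySem.List.pyGetD pattern (n : Int) "" = "0"
        then (n : Int) else lastOff pattern n := by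
      unfold lastOff
      push_cast
      rw [pyRange_succ]
      rw [List.foldl_append]
      simp
    simp only [goA]
    split_ifs with h
    · rw [hlo, if_pos h]
      push_cast; ring
    · rw [goA_acc, ih, hlo, if_neg h]
      push_cast; ring

theorem get_consecutive_work_position_spec : Claim_equal_get_consecutive_work_position := by
  intro pattern pattern_day _
  unfold Spec_get_consecutive_work_position get_consecutive_work_position get_consecutive_work_position_alt
  split_ifs with h
  · rfl
  · have hnn : 0 ≤ pattern_day := by push_neg at h; exact h.2.1
    have hcast : ((pattern_day.toNat : Nat) : Int) = pattern_day := Int.toNat_of_nonneg hnn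
    have := main_lemma pattern pattern_day.toNat
    rw [hcast] at this
    rw [this]
    simp only [lastOff, hcast]
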